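-- pv_equiv track=rewrite | github.com/claudioalvesmonteiro/projeto_AM | code/KNN.py | multiFeaturesData
-- ===== SOURCE A (Python) =====
-- def multiFeaturesData(data, view):
--     data_pd = {}
--     for line in data[0]:
--         new_line =[]
--         split_line = line.split(' ')
--         for i in split_line:
--             if i != '':
--                 new_line.append(i)
--         for i in range(len(new_line)):
--             try:
--                 data_pd[(view+str(i))].append(new_line[i])
--             except:
--                 data_pd[(view+str(i))] = []
--                 data_pd[(view+str(i))].append(new_line[i])
--     return data_pd
-- ===== SOURCE B (Python) =====
-- def multiFeaturesData(data, view):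
--     rows = []
--     for line in data[0]:
--         rows.append([tok for tok in line.split(' ') if tok != ''])
--     maxlen = 0
--     for r in rows:
--         maxlen = max(maxlen, len(r))
--     return {view + str(i): [r[i] for r in rows if i < len(r)] for i in range(maxlen)}
-- ===== Notes on version B (the rewrite author's own statement) =====
-- stated objective: faster
-- what changed: B tokenizes all lines once into a row list and then builds the dict column-major (one list comprehension per column index up to the max row length), replacing A's row-by-row dict mutation that does a key-string build plus try/except KeyError dict lookup and list append per cell.
import Mathlib
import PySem

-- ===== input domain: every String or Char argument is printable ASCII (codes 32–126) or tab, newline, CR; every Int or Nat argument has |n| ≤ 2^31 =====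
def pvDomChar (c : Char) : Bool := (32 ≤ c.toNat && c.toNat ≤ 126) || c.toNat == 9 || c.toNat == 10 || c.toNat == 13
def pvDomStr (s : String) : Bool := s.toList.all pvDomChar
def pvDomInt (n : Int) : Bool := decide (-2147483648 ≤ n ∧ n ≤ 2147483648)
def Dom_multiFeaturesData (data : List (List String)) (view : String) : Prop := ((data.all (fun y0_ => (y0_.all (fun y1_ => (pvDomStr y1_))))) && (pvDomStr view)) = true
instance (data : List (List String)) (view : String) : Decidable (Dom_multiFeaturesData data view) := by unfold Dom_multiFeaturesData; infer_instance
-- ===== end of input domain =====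

-- B builds the filtered token rows once and emits the dict column-major (one pass per column)
-- instead of A's row-by-row dict mutation with a try/except per cell; objective: simpler.


-- ===== PORT A =====
def multiFeaturesData (data : List (List String)) (view : String) : List (String × List String) :=
  match PySem.List.pyGet? data 0 with
  | none => []   -- unreachable under Pre_: Python raises IndexError on data == []
  | some first =>
    (List.foldl (fun (d : PySem.Dict String (List String)) line =>
        let split_line := (PySem.Str.split? line " ").getD []   -- sep " " ≠ "", so split? is always some
        let new_line := List.foldl (fun acc i => if i ≠ "" then acc ++ [i] else acc) [] split_line
        List.foldl (fun (d : PySem.Dict String (List String)) i =>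
            match d.get? (view ++ PySem.Int.toStr i) with
            | some v => d.insert (view ++ PySem.Int.toStr i) (v ++ [PySem.List.pyGetD new_line i ""])
            | none =>
              let d := d.insert (view ++ PySem.Int.toStr i) []
              d.insert (view ++ PySem.Int.toStr i)
                (d.getD (view ++ PySem.Int.toStr i) [] ++ [PySem.List.pyGetD new_line i ""]))
          d (PySem.List.pyRange 0 new_line.length 1))
      PySem.Dict.empty first).items

-- ===== PORT B =====
def multiFeaturesData_alt (data : List (List String)) (view : String) : List (String × List String) :=
  match data with
  | [] => []   -- unreachable under Pre_: B's Python also indexes data[0]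
  | first :: _ =>
    let rows := first.map (fun line => ((PySem.Str.split? line " ").getD []).filter (fun tok => tok ≠ ""))
    let maxlen := List.foldl (fun m r => max m (List.length r)) 0 rows
    (PySem.Dict.ofList ((List.range maxlen).map (fun (i : Nat) =>
      (view ++ PySem.Int.toStr (i : Int),
       (rows.filter (fun r => decide (i < r.length))).map (fun r => r.getD i ""))))).items

-- ===== PRECONDITION & SPEC =====
-- Pre_ excludes only data = [], where both Pythons raise IndexError on data[0].
def Pre_multiFeaturesData (data : List (List String)) (view : String) : Prop := data ≠ []
instance (data : List (List String)) (view : String) : Decidable (Pre_multiFeaturesData data view) := by unfold Pre_multiFeaturesData; infer_instance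
def pvWitness_multiFeaturesData : List (List String) × String := ([["a b", "c"]], "v")

def Spec_multiFeaturesData (data : List (List String)) (view : String) (out : List (String × List String)) : Prop := out = multiFeaturesData_alt data view
instance (data : List (List String)) (view : String) (out : List (String × List String)) : Decidable (Spec_multiFeaturesData data view out) := by unfold Spec_multiFeaturesData; infer_instance

-- ===== CLAIM (what is proved, stated in full; the proofs are below) =====
def Claim_equal_multiFeaturesData : Prop := ∀ (data : List (List String)) (view : String), Dom_multiFeaturesData data view → Pre_multiFeaturesData data view → Spec_multiFeaturesData data view (multiFeaturesData data view)

-- ===== LEMMAS AND PROOFS =====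

-- abbreviations for the shared shapes of the two ports
def pvKey (view : String) (i : Nat) : String := view ++ PySem.Int.toStr (i : Int)

def pvTok (line : String) : List String :=
  ((PySem.Str.split? line " ").getD []).filter (fun tok => tok ≠ "")

def pvCol (rows : List (List String)) (i : Nat) : List String :=
  (rows.filter (fun r => decide (i < r.length))).map (fun r => r.getD i "")

def pvMl (rows : List (List String)) : Nat :=
  List.foldl (fun m r => max m (List.length r)) 0 rows

def pvItems (view : String) (rows : List (List String)) : List (String × List String) :=
  (List.range (pvMl rows)).map (fun i => (pvKey view i, pvCol rows i))

def pvBody (view : String) (r : List String) (d : PySem.Dict String (List String)) (i : Int) :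
    PySem.Dict String (List String) :=
  match d.get? (view ++ PySem.Int.toStr i) with
  | some v => d.insert (view ++ PySem.Int.toStr i) (v ++ [PySem.List.pyGetD r i ""])
  | none =>
    let d := d.insert (view ++ PySem.Int.toStr i) []
    d.insert (view ++ PySem.Int.toStr i)
      (d.getD (view ++ PySem.Int.toStr i) [] ++ [PySem.List.pyGetD r i ""])

def pvStep (view : String) (d : PySem.Dict String (List String)) (r : List String) :
    PySem.Dict String (List String) :=
  List.foldl (pvBody view r) d (PySem.List.pyRange 0 r.length 1)

-- str(n) for n : Nat is injective
lemma pvToDigitsCore_eq (f : Nat) : ∀ (n : Nat) (l : List Char), n < f → 0 < n →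
    Nat.toDigitsCore 10 f n l = ((Nat.digits 10 n).map Nat.digitChar).reverse ++ l := by
  induction f with
  | zero => intro n l hf hn; omega
  | succ f ih =>
    intro n l hf hn
    rw [Nat.toDigitsCore]
    rw [Nat.digits_def' (by norm_num : (1:Nat) < 10) hn]
    by_cases h0 : n / 10 = 0
    · simp [h0]
    · rw [if_neg h0, ih (n / 10) _ (by omega) (by omega)]
      simp

lemma pvToDigits_pos (n : Nat) (hn : 0 < n) :
    Nat.toDigits 10 n = ((Nat.digits 10 n).map Nat.digitChar).reverse := by
  have h : Nat.toDigits 10 n = Nat.toDigitsCore 10 (n + 1) n [] := rfl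
  rw [h, pvToDigitsCore_eq (n + 1) n [] (by omega) hn]
  simp

lemma pvDigitChar_inj : ∀ a < 10, ∀ b < 10, Nat.digitChar a = Nat.digitChar b → a = b := by decide

lemma pvMapDigitChar_inj : ∀ (l1 l2 : List Nat), (∀ x ∈ l1, x < 10) → (∀ x ∈ l2, x < 10) →
    l1.map Nat.digitChar = l2.map Nat.digitChar → l1 = l2 := by
  intro l1
  induction l1 with
  | nil => intro l2 _ _ h; cases l2 <;> simp_all
  | cons a t ih =>
    intro l2 h1 h2 h
    cases l2 with
    | nil => simp_all
    | cons b u =>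
      simp only [List.map_cons, List.cons.injEq] at h
      have hab : a = b := pvDigitChar_inj a (h1 a (by simp)) b (h2 b (by simp)) h.1
      have ht := ih u (fun x hx => h1 x (by simp [hx])) (fun x hx => h2 x (by simp [hx])) h.2
      simp [hab, ht]

lemma pvToDigits_ne_zero_char (k : Nat) (hk : 0 < k) : Nat.toDigits 10 k ≠ ['0'] := by
  intro hcon
  rw [pvToDigits_pos k hk] at hcon
  have hmap : (Nat.digits 10 k).map Nat.digitChar = ['0'] := by
    have := congrArg List.reverse hcon
    simpa using this
  obtain ⟨d, hd1, hd2⟩ : ∃ d, Nat.digits 10 k = [d] ∧ Nat.digitChar d = '0' := by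
    cases hdk : Nat.digits 10 k with
    | nil => simp [hdk] at hmap
    | cons x t =>
      rw [hdk] at hmap
      cases t with
      | nil => exact ⟨x, rfl, by simpa using hmap⟩
      | cons y u => simp at hmap
  have hdlt : d < 10 := Nat.digits_lt_base (by norm_num) (by rw [hd1]; simp)
  have hd0 : d = 0 := pvDigitChar_inj d hdlt 0 (by norm_num) hd2
  have hofd : k = Nat.ofDigits 10 (Nat.digits 10 k) := (Nat.ofDigits_digits 10 k).symm
  rw [hd1, hd0] at hofd
  simp [Nat.ofDigits] at hofd
  omega

lemma pvToDigits_inj (m n : Nat) (h : Nat.toDigits 10 m = Nat.toDigits 10 n) : m = n := by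
  rcases Nat.eq_zero_or_pos m with hm | hm <;> rcases Nat.eq_zero_or_pos n with hn | hn
  · omega
  · exfalso; apply pvToDigits_ne_zero_char n hn; rw [← h, hm]; decide
  · exfalso; apply pvToDigits_ne_zero_char m hm; rw [h, hn]; decide
  · rw [pvToDigits_pos m hm, pvToDigits_pos n hn] at h
    have hrev := List.reverse_injective h
    have hdig := pvMapDigitChar_inj (Nat.digits 10 m) (Nat.digits 10 n)
      (fun x hx => Nat.digits_lt_base (by norm_num) hx)
      (fun x hx => Nat.digits_lt_base (by norm_num) hx) hrev
    exact Nat.digits_inj_iff.mp hdig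

lemma pvKey_inj (view : String) : Function.Injective (pvKey view) := by
  intro m n h
  unfold pvKey at h
  have h1 : (PySem.Int.toStr (m : Int)).toList = (PySem.Int.toStr (n : Int)).toList := by
    have := congrArg String.toList h
    simpa [String.toList_append] using this
  have hm : PySem.Int.toChars (m : Int) = Nat.toDigits 10 m := by
    have hnonneg : ¬ ((m : Int) < 0) := by omega
    simp [PySem.Int.toChars, hnonneg]
  have hn : PySem.Int.toChars (n : Int) = Nat.toDigits 10 n := by
    have hnonneg : ¬ ((n : Int) < 0) := by omega
    simp [PySem.Int.toChars, hnonneg]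
  rw [show PySem.Int.toStr (m : Int) = String.ofList (PySem.Int.toChars (m : Int)) from rfl,
      show PySem.Int.toStr (n : Int) = String.ofList (PySem.Int.toChars (n : Int)) from rfl,
      String.toList_ofList, String.toList_ofList, hm, hn] at h1
  exact pvToDigits_inj m n h1

-- the column-major dict: key lookup and membership
lemma pvNodup_keys (view : String) (m : Nat) (v : Nat → List String) :
    (((List.range m).map (fun i => (pvKey view i, v i))).map (fun p => p.1)).Nodup := by
  rw [List.map_map]
  exact List.Nodup.map (pvKey_inj view) List.nodup_range

lemma pvGet?_mk (view : String) (m : Nat) (v : Nat → List String) (j : Nat) :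
    (PySem.Dict.mk ((List.range m).map (fun i => (pvKey view i, v i)))).get? (pvKey view j)
      = if j < m then some (v j) else none := by
  by_cases hj : j < m
  · rw [if_pos hj]
    apply PySem.Dict.get?_of_mem_items
    · exact List.mem_map_of_mem (by simpa using hj)
    · rw [PySem.Dict.keys_mk]; exact pvNodup_keys view m v
  · rw [if_neg hj]
    rw [PySem.Dict.get?_eq_none_iff_not_mem_keys]
    rw [PySem.Dict.keys_mk]
    intro hmem
    rw [List.map_map] at hmem
    obtain ⟨i, hi, hkey⟩ := List.mem_map.mp hmem
    exact hj (pvKey_inj view hkey ▸ List.mem_range.mp hi)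

lemma pvContains_mk (view : String) (m : Nat) (v : Nat → List String) (j : Nat) :
    (PySem.Dict.mk ((List.range m).map (fun i => (pvKey view i, v i)))).contains (pvKey view j)
      = decide (j < m) := by
  by_cases hj : j < m
  · simp only [hj, decide_true]
    rw [PySem.Dict.contains_iff_mem_keys, PySem.Dict.keys_mk]
    exact List.mem_map_of_mem (List.mem_map_of_mem (by simpa using hj))
  · simp only [hj, decide_false]
    rw [Bool.eq_false_iff]
    intro hct
    have hmem := (PySem.Dict.contains_iff_mem_keys _ _).mp hct
    rw [PySem.Dict.keys_mk, List.map_map] at hmem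
    obtain ⟨i, hi, hkey⟩ := List.mem_map.mp hmem
    exact hj (pvKey_inj view hkey ▸ List.mem_range.mp hi)

lemma pvLen_le_ml (rows : List (List String)) : ∀ r ∈ rows, r.length ≤ pvMl rows :=
  (PySem.List.le_foldl_max_nat rows List.length 0).2

lemma pvMl_append (rows : List (List String)) (r : List String) :
    pvMl (rows ++ [r]) = max (pvMl rows) r.length := by
  unfold pvMl; rw [List.foldl_append]; rfl

lemma pvCol_append (rows : List (List String)) (r : List String) (i : Nat) :
    pvCol (rows ++ [r]) i = pvCol rows i ++ (if i < r.length then [r.getD i ""] else []) := by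
  unfold pvCol
  rw [List.filter_append, List.map_append]
  congr 1
  by_cases h : i < r.length <;> simp [h]

lemma pvCol_of_ml_le (rows : List (List String)) (i : Nat) (h : pvMl rows ≤ i) :
    pvCol rows i = [] := by
  unfold pvCol
  rw [List.filter_eq_nil_iff.mpr, List.map_nil]
  intro r hr
  simp only [decide_eq_true_eq, not_lt]
  exact le_trans (pvLen_le_ml rows r hr) h

-- one row of A's loop, acting on the column-major dict
lemma pvStep_mk (view : String) (rows : List (List String)) (r : List String) :
    pvStep view (PySem.Dict.mk (pvItems view rows)) r
      = PySem.Dict.mk (pvItems view (rows ++ [r])) := by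
  unfold pvStep
  rw [PySem.List.pyRange_one]
  have hcast : ((r.length : Int) - 0).toNat = r.length := by omega
  rw [hcast, List.foldl_map]
  have main : ∀ j, j ≤ r.length →
      List.foldl (fun d (k : Nat) => pvBody view r d ((0 : Int) + (k : Int)))
          (PySem.Dict.mk (pvItems view rows)) (List.range j)
        = PySem.Dict.mk ((List.range (max (pvMl rows) j)).map
            (fun i => (pvKey view i, if i < j then pvCol (rows ++ [r]) i else pvCol rows i))) := by
    intro j
    induction j with
    | zero =>
      intro _
      simp only [List.range_zero, List.foldl_nil, Nat.max_zero]
      unfold pvItems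
      simp
    | succ j ih =>
      intro hj1
      rw [List.range_succ, List.foldl_append, ih (by omega), List.foldl_cons, List.foldl_nil]
      have hg := pvGet?_mk view (max (pvMl rows) j)
        (fun i => if i < j then pvCol (rows ++ [r]) i else pvCol rows i) j
      by_cases hj : j < pvMl rows
      · -- column j already present: append to it in place
        rw [if_pos (by omega), if_neg (by omega)] at hg
        unfold pvBody
        simp only [zero_add]
        rw [show (view ++ PySem.Int.toStr (j : Int)) = pvKey view j from rfl, hg]
        apply PySem.Dict.ext
        rw [PySem.Dict.items_insert_of_contains _ _
          (by rw [show (pvKey view j) = pvKey view j from rfl, pvContains_mk]; simpa using (by omega : j < max (pvMl rows) j))]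
        show List.map _ (List.map _ (List.range (max (pvMl rows) j)))
          = List.map _ (List.range (max (pvMl rows) (j+1)))
        rw [show max (pvMl rows) (j+1) = max (pvMl rows) j by omega, List.map_map]
        apply List.map_congr_left
        intro i hi
        by_cases hij : i = j
        · subst hij
          simp only [Function.comp_apply, BEq.rfl, if_pos (by omega : i < i + 1), if_true]
          rw [pvCol_append, if_pos (by omega : i < r.length)]
          simp [PySem.List.pyGetD_natCast]
        · have hbeq : (pvKey view i == pvKey view j) = false := by
            rw [beq_eq_false_iff_ne]
            exact fun hc => hij (pvKey_inj view hc)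
          simp only [Function.comp_apply, hbeq, Bool.false_eq_true, if_false]
          by_cases h2 : i < j
          · rw [if_pos h2, if_pos (by omega : i < j + 1)]
          · rw [if_neg h2, if_neg (by omega : ¬ i < j + 1)]
      · -- new column j: appended at the end of the dict
        rw [if_neg (by omega)] at hg
        unfold pvBody
        simp only [zero_add]
        rw [show (view ++ PySem.Int.toStr (j : Int)) = pvKey view j from rfl, hg]
        rw [PySem.Dict.getD_insert_self, PySem.Dict.insert_insert_self]
        apply PySem.Dict.ext
        rw [PySem.Dict.items_insert_of_not_contains _ _
          (by rw [pvContains_mk]; simpa using (by omega : ¬ j < max (pvMl rows) j))]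
        show List.map _ (List.range (max (pvMl rows) j)) ++ _
          = List.map _ (List.range (max (pvMl rows) (j+1)))
        rw [show max (pvMl rows) (j+1) = j + 1 by omega,
            show max (pvMl rows) j = j by omega,
            List.range_succ, List.map_append]
        congr 1
        · apply List.map_congr_left
          intro i hi
          have hilt : i < j := List.mem_range.mp hi
          rw [if_pos hilt, if_pos (by omega)]
        · simp only [List.map_cons, List.map_nil]
          rw [if_pos (by omega : j < j + 1)]
          rw [pvCol_append, if_pos (by omega : j < r.length), pvCol_of_ml_le rows j (by omega)]
          simp [PySem.List.pyGetD_natCast]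
  have hfin := main r.length (le_refl _)
  rw [hfin]
  apply PySem.Dict.ext
  show _ = pvItems view (rows ++ [r])
  unfold pvItems
  rw [pvMl_append]
  apply List.map_congr_left
  intro i hi
  by_cases h : i < r.length
  · rw [if_pos h]
  · rw [if_neg h, pvCol_append, if_neg h, List.append_nil]

lemma pvFold (view : String) (rows : List (List String)) :
    List.foldl (pvStep view) PySem.Dict.empty rows = PySem.Dict.mk (pvItems view rows) := by
  induction rows using List.reverseRecOn with
  | nil =>
    apply PySem.Dict.ext
    show _ = pvItems view []
    unfold pvItems pvMl
    simp
    rfl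
  | append_singleton rs r ih =>
    rw [List.foldl_append, List.foldl_cons, List.foldl_nil, ih, pvStep_mk]

lemma pvTok_foldl (l : List String) :
    List.foldl (fun acc i => if i ≠ "" then acc ++ [i] else acc) ([] : List String) l
      = l.filter (fun t => t ≠ "") := by
  have h := PySem.List.foldl_append_if (fun t : String => decide (t ≠ "")) id l []
  simpa using h

lemma pvOfList_items (view : String) (rows : List (List String)) :
    (PySem.Dict.ofList (pvItems view rows)).items = pvItems view rows := by
  have hof : PySem.Dict.ofList (pvItems view rows)
      = (pvItems view rows).foldl (fun d p => d.insert p.1 p.2) PySem.Dict.empty := rfl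
  rw [hof]
  have h := PySem.Dict.items_foldl_insert_fresh (pvItems view rows)
    (fun p => p.1) (fun p => p.2) PySem.Dict.empty
    (fun a _ => by simp [PySem.Dict.empty, PySem.Dict.contains])
    (pvNodup_keys view (pvMl rows) (pvCol rows))
  simpa using h

-- ===== VERDICT (by name: the statement is the Claim_ definition above) =====
theorem multiFeaturesData_spec : Claim_equal_multiFeaturesData := by
  intro data view _ hpre
  unfold Spec_multiFeaturesData
  cases data with
  | nil => exact absurd rfl hpre
  | cons first rest =>
    have hB : multiFeaturesData_alt (first :: rest) view = pvItems view (first.map pvTok) := by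
      unfold multiFeaturesData_alt
      show (PySem.Dict.ofList ((List.range (pvMl (first.map pvTok))).map
        (fun i => (pvKey view i, pvCol (first.map pvTok) i)))).items = _
      exact pvOfList_items view (first.map pvTok)
    have hA : multiFeaturesData (first :: rest) view = pvItems view (first.map pvTok) := by
      unfold multiFeaturesData
      have hget : PySem.List.pyGet? (first :: rest) 0 = some first := by
        simp [PySem.List.pyGet?, PySem.List.pyIdx?]
      rw [hget]
      show (List.foldl _ PySem.Dict.empty first).items = _
      have hbody := PySem.List.foldl_congr_mem first
        (fun (d : PySem.Dict String (List String)) line =>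
          let split_line := (PySem.Str.split? line " ").getD []
          let new_line := List.foldl (fun acc i => if i ≠ "" then acc ++ [i] else acc) [] split_line
          List.foldl (fun (d : PySem.Dict String (List String)) i =>
              match d.get? (view ++ PySem.Int.toStr i) with
              | some v => d.insert (view ++ PySem.Int.toStr i) (v ++ [PySem.List.pyGetD new_line i ""])
              | none =>
                let d := d.insert (view ++ PySem.Int.toStr i) []
                d.insert (view ++ PySem.Int.toStr i)
                  (d.getD (view ++ PySem.Int.toStr i) [] ++ [PySem.List.pyGetD new_line i ""]))
            d (PySem.List.pyRange 0 new_line.length 1))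
        (fun d line => pvStep view d (pvTok line)) PySem.Dict.empty
        (by
          intro d line _
          show List.foldl _ d (PySem.List.pyRange 0 (List.foldl
            (fun acc i => if i ≠ "" then acc ++ [i] else acc) []
            ((PySem.Str.split? line " ").getD [])).length 1) = _
          rw [pvTok_foldl]
          rfl)
      rw [hbody, ← List.foldl_map (f := pvTok) (g := pvStep view), pvFold]
    rw [hA, hB]
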